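-- pv_equiv track=rewrite | github.com/sonyal/FitnessTracker | frontend/app.py | format_strength_workout
-- ===== SOURCE A (Python) =====
-- def format_strength_workout(request: dict) -> dict:
--     result = {}
--     for week, value1 in request.items():
--         result[reword(week)] = {}
--         for day, value2 in value1.items():
--             result[reword(week)][day] = {}
--             for area, value3 in value2.items():
--                 result[reword(week)][day][area] = {}
--                 for exercise, value4 in value3.items():
--                     result[reword(week)][day][area][reword(exercise)] = {}
--                     for sets, value5 in value4.items():
--                         result[reword(week)][day][area][reword(exercise)][reword(sets)] = {}
--                         if value5 is dict:
--                             for reps, value6 in value5.items():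
--                                 result[reword(week)][day][area][reword(exercise)][reword(sets)][reword(reps)] = value6
--                         else:
--                             result[reword(week)][day][area][reword(exercise)][reword(sets)] = value5
--
--     return result
--
-- def reword(word: str) -> str:
--     if "set-" in word:
--         return "set " + word[4]
--     if "week-" in word:
--         return "Week " + word[5]
--     switcher = {
--         "overhead_press": "overhead press",
--         "bench_press": "bench press",
--         "tricep_pushdown": "tricep pushdown",
--         "face_pulls": "face pulls",
--         "ab_wheel": "ab wheel",
--         "russian_twists": "russian twists",
--     }
--
--     return switcher.get(word, word)
-- ===== SOURCE B (Python) =====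
-- # B: one recursive descent with a per-level list of key transforms,
-- # replacing A's five hand-unrolled nested loops.
--
-- def reword(word: str) -> str:
--     if "set-" in word:
--         return "set " + word[4]
--     if "week-" in word:
--         return "Week " + word[5]
--     switcher = {
--         "overhead_press": "overhead press",
--         "bench_press": "bench press",
--         "tricep_pushdown": "tricep pushdown",
--         "face_pulls": "face pulls",
--         "ab_wheel": "ab wheel",
--         "russian_twists": "russian twists",
--     }
--     return switcher.get(word, word)
--
--
-- def _relabel(d, transforms):
--     if not transforms:
--         return d  # leaf value, assigned verbatim
--     head, rest = transforms[0], transforms[1:]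
--     out = {}
--     for key, value in d.items():
--         out[head(key)] = _relabel(value, rest)
--     return out
--
--
-- def format_strength_workout(request: dict) -> dict:
--     identity = lambda k: k
--     return _relabel(request, [reword, identity, identity, reword, reword])
-- ===== Notes on version B (the rewrite author's own statement) =====
-- stated objective: simpler
-- what changed: A's five hand-unrolled nested loops, each assignment re-traversing the result via chained indexing result[reword(week)][day][area][...], are replaced by one recursive descent with a per-level list of key transforms [reword, id, id, reword, reword] that builds each sub-dict once.
import Mathlib
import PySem

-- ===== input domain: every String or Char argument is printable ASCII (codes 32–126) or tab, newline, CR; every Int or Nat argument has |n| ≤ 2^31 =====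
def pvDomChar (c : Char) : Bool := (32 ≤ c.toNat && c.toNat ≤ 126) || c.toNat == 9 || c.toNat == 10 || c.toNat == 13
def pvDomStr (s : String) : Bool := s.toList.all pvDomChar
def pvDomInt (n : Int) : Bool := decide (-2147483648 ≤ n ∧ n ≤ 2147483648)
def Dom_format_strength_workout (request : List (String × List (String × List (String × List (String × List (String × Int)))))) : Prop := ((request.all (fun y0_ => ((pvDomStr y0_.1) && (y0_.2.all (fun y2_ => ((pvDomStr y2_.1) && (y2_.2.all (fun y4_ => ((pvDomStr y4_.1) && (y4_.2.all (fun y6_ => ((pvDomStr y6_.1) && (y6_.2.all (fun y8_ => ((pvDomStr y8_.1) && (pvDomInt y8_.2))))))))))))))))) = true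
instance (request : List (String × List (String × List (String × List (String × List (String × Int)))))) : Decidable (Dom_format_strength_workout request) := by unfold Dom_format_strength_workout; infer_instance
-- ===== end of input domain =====

-- B replaces A's five hand-unrolled nested loops by one recursive descent with a
-- per-level list of key transforms; equal output, simpler (one descent, no
-- repeated chained lookups per leaf).
set_option maxHeartbeats 2000000


-- ===== PORT A =====
-- Shared helper: both Pythons define textually the same `reword`.
-- Python raises IndexError in `word[4]` / `word[5]` exactly when word = "set-" / "week-";
-- those inputs are excluded by Pre_ below, the `.getD ' '` arm is unreachable there.
def reword (word : String) : String :=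
  if PySem.Str.isIn "set-" word then
    "set " ++ String.ofList [(PySem.Str.pyGet? word 4).getD ' ']
  else if PySem.Str.isIn "week-" word then
    "Week " ++ String.ofList [(PySem.Str.pyGet? word 5).getD ' ']
  else
    PySem.Dict.getD (PySem.Dict.mk
      [("overhead_press", "overhead press"), ("bench_press", "bench press"),
       ("tricep_pushdown", "tricep pushdown"), ("face_pulls", "face pulls"),
       ("ab_wheel", "ab wheel"), ("russian_twists", "russian twists")]) word word

-- Python dict operations on the association-list encoding (via PySem.Dict):
-- dIns d k v = `d[k] = v`; dMod d k dflt f mutates the sub-dict stored at k in place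
-- (in A the key is always present, so the default is never consulted).
def dIns {α : Type} (d : List (String × α)) (k : String) (v : α) : List (String × α) :=
  ((PySem.Dict.mk d).insert k v).items
def dMod {α : Type} (d : List (String × α)) (k : String) (dflt : α) (f : α → α) : List (String × α) :=
  ((PySem.Dict.mk d).modify k dflt f).items

-- Literal port of A's nested loops. Each Python assignment through chained indexing
-- `result[reword(week)][day]… = x` is the corresponding chain of in-place dict updates.
-- In the innermost loop Python sets `…[reword(sets)] = {}` and immediately overwrites it
-- with value5 (the `value5 is dict` test is always False: value5 is an int, not the class
-- dict); the two successive assignments to the same key are one insert of value5 here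
-- (the transient `{}` is not a value of the declared type).
def format_strength_workout (request : List (String × List (String × List (String × List (String × List (String × Int)))))) : List (String × List (String × List (String × List (String × List (String × Int))))) :=
  request.foldl (fun result wv =>
    let result := dIns result (reword wv.1) []
    wv.2.foldl (fun result dv =>
      let result := dMod result (reword wv.1) [] (fun d1 => dIns d1 dv.1 [])
      dv.2.foldl (fun result av =>
        let result := dMod result (reword wv.1) [] (fun d1 => dMod d1 dv.1 [] (fun d2 => dIns d2 av.1 []))
        av.2.foldl (fun result ev =>
          let result := dMod result (reword wv.1) [] (fun d1 => dMod d1 dv.1 [] (fun d2 => dMod d2 av.1 [] (fun d3 => dIns d3 (reword ev.1) [])))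
          ev.2.foldl (fun result sv =>
            dMod result (reword wv.1) [] (fun d1 => dMod d1 dv.1 [] (fun d2 => dMod d2 av.1 [] (fun d3 => dMod d3 (reword ev.1) [] (fun d4 => dIns d4 (reword sv.1) sv.2))))
          ) result
        ) result
      ) result
    ) result
  ) []

-- ===== PORT B =====
-- Source B's `_relabel(d, transforms)`: build a fresh dict, mapping each key with the head
-- transform and recursing with the tail; empty tail returns the leaf value verbatim.
-- Lean's types fix the nesting depth, so the recursion is instantiated per level:
-- relabelWith f g = one call of _relabel with head transform f and `g` the recursion
-- on the tail ((fun v => v) at the leaf).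
def relabelWith {α β : Type} (f : String → String) (g : α → β) (xs : List (String × α)) : List (String × β) :=
  xs.foldl (fun out kv => dIns out (f kv.1) (g kv.2)) []

def format_strength_workout_alt (request : List (String × List (String × List (String × List (String × List (String × Int)))))) : List (String × List (String × List (String × List (String × List (String × Int))))) :=
  relabelWith reword
    (relabelWith (fun k => k)
      (relabelWith (fun k => k)
        (relabelWith reword
          (relabelWith reword (fun v => v))))) request

-- ===== PRECONDITION & SPEC =====
-- Pre_ excludes exactly the inputs on which Python's reword raises IndexError
-- (a key equal to "set-" or "week-" at a relabelled level: week, exercise or sets keys);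
-- both A and B raise there.
def okKey (s : String) : Bool := !(s == "set-") && !(s == "week-")
def Pre_format_strength_workout (request : List (String × List (String × List (String × List (String × List (String × Int)))))) : Prop :=
  (request.all (fun wv => okKey wv.1 && wv.2.all (fun dv => dv.2.all (fun av => av.2.all (fun ev => okKey ev.1 && ev.2.all (fun sv => okKey sv.1)))))) = true
instance (request : List (String × List (String × List (String × List (String × List (String × Int)))))) : Decidable (Pre_format_strength_workout request) := by unfold Pre_format_strength_workout; infer_instance

def pvWitness_format_strength_workout : (List (String × List (String × List (String × List (String × List (String × Int)))))) :=
  [("week-1", [("monday", [("chest", [("bench_press", [("set-1", 5), ("set-2", 8)])])])])]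

def Spec_format_strength_workout (request : List (String × List (String × List (String × List (String × List (String × Int)))))) (out : List (String × List (String × List (String × List (String × List (String × Int)))))) : Prop := out = format_strength_workout_alt request
instance (request : List (String × List (String × List (String × List (String × List (String × Int)))))) (out : List (String × List (String × List (String × List (String × List (String × Int)))))) : Decidable (Spec_format_strength_workout request out) := by
  unfold Spec_format_strength_workout
  letI h2 : DecidableEq (List (String × Int)) := inferInstance
  letI h3 : DecidableEq (List (String × List (String × Int))) := inferInstance
  letI h4 : DecidableEq (List (String × List (String × List (String × Int)))) := inferInstance
  letI h5 : DecidableEq (List (String × List (String × List (String × List (String × Int))))) := inferInstance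
  infer_instance

-- ===== CLAIM =====
def Claim_equal_format_strength_workout : Prop := ∀ (request : List (String × List (String × List (String × List (String × List (String × Int)))))), Dom_format_strength_workout request → Pre_format_strength_workout request → Spec_format_strength_workout request (format_strength_workout request)

-- ===== LEMMAS AND PROOFS =====
theorem mk_items {κ ν : Type} [BEq κ] (d : PySem.Dict κ ν) : PySem.Dict.mk d.items = d := rfl

theorem dMod_dIns {α : Type} (d : List (String × α)) (k : String) (v : α) (dflt : α) (f : α → α) :
    dMod (dIns d k v) k dflt f = dIns d k (f v) := by
  simp [dMod, dIns, PySem.Dict.modify, mk_items, PySem.Dict.getD_insert_self, PySem.Dict.insert_insert_self]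

theorem dMod_dMod {α : Type} (d : List (String × α)) (k : String) (dflt : α) (f g : α → α) :
    dMod (dMod d k dflt f) k dflt g = dMod d k dflt (g ∘ f) := by
  simp [dMod, PySem.Dict.modify, mk_items, PySem.Dict.getD_insert_self, PySem.Dict.insert_insert_self]

theorem foldl_fun_congr {ι α : Type} (f g : α → ι → α) (xs : List ι) (i : α)
    (h : ∀ a x, f a x = g a x) : xs.foldl f i = xs.foldl g i := by
  induction xs generalizing i with
  | nil => rfl
  | cons x xs ih => simp only [List.foldl_cons, h]; exact ih _

theorem foldl_M {ι α β : Type} (M : α → (β → β) → α)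
    (hM : ∀ r f g, M (M r f) g = M r (g ∘ f))
    (F : ι → β → β) (xs : List ι) (r : α) (f : β → β) :
    xs.foldl (fun r x => M r (F x)) (M r f)
      = M r (fun t => xs.foldl (fun u x => F x u) (f t)) := by
  induction xs generalizing f with
  | nil => rfl
  | cons x xs ih =>
      simp only [List.foldl_cons]
      rw [hM, ih]
      rfl

theorem foldl_dMod_dIns {ι α : Type} (k : String) (dflt : α) (F : ι → α → α)
    (xs : List ι) (t : List (String × α)) (v : α) :
    xs.foldl (fun t x => dMod t k dflt (F x)) (dIns t k v)
      = dIns t k (xs.foldl (fun u x => F x u) v) := by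
  induction xs generalizing v with
  | nil => rfl
  | cons x xs ih => simp only [List.foldl_cons]; rw [dMod_dIns, ih]

-- Type abbreviations for the nested dict levels (proof-side only)
abbrev W5 : Type := List (String × Int)
abbrev W4 : Type := List (String × W5)
abbrev W3 : Type := List (String × W4)
abbrev W2 : Type := List (String × W3)
abbrev W1 : Type := List (String × W2)

-- Mi r f applies f to the sub-dict of the result reached by the first i chained indexings.
def M1 (kw : String) (r : W1) (f : W2 → W2) : W1 := dMod r kw [] f
def M2 (kw kd : String) (r : W1) (f : W3 → W3) : W1 := M1 kw r (fun d => dMod d kd [] f)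
def M3 (kw kd ka : String) (r : W1) (f : W4 → W4) : W1 := M2 kw kd r (fun d => dMod d ka [] f)
def M4 (kw kd ka ke : String) (r : W1) (f : W5 → W5) : W1 := M3 kw kd ka r (fun d => dMod d ke [] f)

theorem hM1 (kw : String) : ∀ (r : W1) (f g : W2 → W2), M1 kw (M1 kw r f) g = M1 kw r (g ∘ f) :=
  fun r f g => dMod_dMod r kw [] f g

theorem hM2 (kw kd : String) : ∀ (r : W1) (f g : W3 → W3), M2 kw kd (M2 kw kd r f) g = M2 kw kd r (g ∘ f) := by
  intro r f g
  unfold M2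
  rw [hM1]
  congr 1
  funext d
  simp [Function.comp, dMod_dMod]

theorem hM3 (kw kd ka : String) : ∀ (r : W1) (f g : W4 → W4), M3 kw kd ka (M3 kw kd ka r f) g = M3 kw kd ka r (g ∘ f) := by
  intro r f g
  unfold M3
  rw [hM2]
  congr 1
  funext d
  simp [Function.comp, dMod_dMod]

-- Collapse of A's innermost (sets) loop for one exercise item.
theorem stepEq4 (kw kd ka : String) (r : W1) (ev : String × W5) :
    ev.2.foldl (fun result sv => M4 kw kd ka (reword ev.1) result (fun d4 => dIns d4 (reword sv.1) sv.2))
      (M3 kw kd ka r (fun d3 => dIns d3 (reword ev.1) []))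
    = M3 kw kd ka r (fun d3 => dIns d3 (reword ev.1) (relabelWith reword (fun v => v) ev.2)) := by
  simp only [M4]
  rw [foldl_M (M3 kw kd ka) (hM3 kw kd ka)]
  simp only [foldl_dMod_dIns]
  simp only [relabelWith]

-- Collapse of A's exercise loop for one area item.
theorem stepEq3 (kw kd : String) (r : W1) (av : String × W4) :
    av.2.foldl (fun result ev =>
        ev.2.foldl (fun result sv => M4 kw kd av.1 (reword ev.1) result (fun d4 => dIns d4 (reword sv.1) sv.2))
          (M3 kw kd av.1 result (fun d3 => dIns d3 (reword ev.1) [])))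
      (M2 kw kd r (fun d2 => dIns d2 av.1 []))
    = M2 kw kd r (fun d2 => dIns d2 av.1 (relabelWith reword (relabelWith reword (fun v => v)) av.2)) := by
  refine (foldl_fun_congr _ _ av.2 _ (fun result ev => stepEq4 kw kd av.1 result ev)).trans ?_
  simp only [M3]
  rw [foldl_M (M2 kw kd) (hM2 kw kd)]
  simp only [foldl_dMod_dIns]
  simp only [relabelWith]

-- Collapse of A's area loop for one day item.
theorem stepEq2 (kw : String) (r : W1) (dv : String × W3) :
    dv.2.foldl (fun result av =>
        av.2.foldl (fun result ev =>
            ev.2.foldl (fun result sv => M4 kw dv.1 av.1 (reword ev.1) result (fun d4 => dIns d4 (reword sv.1) sv.2))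
              (M3 kw dv.1 av.1 result (fun d3 => dIns d3 (reword ev.1) [])))
          (M2 kw dv.1 result (fun d2 => dIns d2 av.1 [])))
      (M1 kw r (fun d1 => dIns d1 dv.1 []))
    = M1 kw r (fun d1 => dIns d1 dv.1 (relabelWith (fun k => k) (relabelWith reword (relabelWith reword (fun v => v))) dv.2)) := by
  refine (foldl_fun_congr _ _ dv.2 _ (fun result av => stepEq3 kw dv.1 result av)).trans ?_
  simp only [M2]
  rw [foldl_M (M1 kw) (hM1 kw)]
  simp only [foldl_dMod_dIns]
  simp only [relabelWith]

-- Collapse of A's day loop for one week item: A's whole per-week body is one insert of B's sub-result.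
theorem stepEq1 (r : W1) (wv : String × W2) :
    wv.2.foldl (fun result dv =>
        dv.2.foldl (fun result av =>
            av.2.foldl (fun result ev =>
                ev.2.foldl (fun result sv => M4 (reword wv.1) dv.1 av.1 (reword ev.1) result (fun d4 => dIns d4 (reword sv.1) sv.2))
                  (M3 (reword wv.1) dv.1 av.1 result (fun d3 => dIns d3 (reword ev.1) [])))
              (M2 (reword wv.1) dv.1 result (fun d2 => dIns d2 av.1 [])))
          (M1 (reword wv.1) result (fun d1 => dIns d1 dv.1 [])))
      (dIns r (reword wv.1) [])
    = dIns r (reword wv.1)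
        (relabelWith (fun k => k) (relabelWith (fun k => k) (relabelWith reword (relabelWith reword (fun v => v)))) wv.2) := by
  refine (foldl_fun_congr _ _ wv.2 _ (fun result dv => stepEq2 (reword wv.1) result dv)).trans ?_
  simp only [M1]
  simp only [foldl_dMod_dIns]
  simp only [relabelWith]

theorem format_strength_workout_spec : Claim_equal_format_strength_workout := by
  intro request _ _
  unfold Spec_format_strength_workout
  exact foldl_fun_congr _ _ request [] (fun r wv => stepEq1 r wv)
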